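-- pv_equiv track=rewrite | github.com/taka04649/ibd-education-bot | src/pubmed_client.py | _select_primary_ptype
-- ===== SOURCE A (Python) =====
-- from typing import Dict, List
--
-- PRIORITY_PTYPES = [
--     "Practice Guideline",
--     "Guideline",
--     "Meta-Analysis",
--     "Systematic Review",
--     "Randomized Controlled Trial",
--     "Clinical Trial, Phase III",
--     "Clinical Trial, Phase II",
--     "Clinical Trial",
--     "Multicenter Study",
--     "Observational Study",
--     "Review",
-- ]
--
-- def _select_primary_ptype(ptypes: List[str]) -> str:
--     for priority in PRIORITY_PTYPES:
--         if priority in ptypes: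
--             return priority
--     for pt in ptypes:
--         if pt and pt != "Journal Article":
--             return pt
--     return "Journal Article"
-- ===== SOURCE B (Python) =====
-- from typing import List
--
-- PRIORITY_PTYPES = [
--     "Practice Guideline",
--     "Guideline",
--     "Meta-Analysis",
--     "Systematic Review",
--     "Randomized Controlled Trial",
--     "Clinical Trial, Phase III",
--     "Clinical Trial, Phase II",
--     "Clinical Trial",
--     "Multicenter Study",
--     "Observational Study",
--     "Review",
-- ]
--
-- _RANK = {name: i for i, name in enumerate(PRIORITY_PTYPES)}
--
-- def _select_primary_ptype(ptypes: List[str]) -> str: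
--     best_rank = None
--     best_name = None
--     fallback = None
--     for pt in ptypes:
--         r = _RANK.get(pt)
--         if r is not None and (best_rank is None or r < best_rank):
--             best_rank = r
--             best_name = pt
--         if fallback is None and pt and pt != "Journal Article":
--             fallback = pt
--     if best_name is not None:
--         return best_name
--     if fallback is not None:
--         return fallback
--     return "Journal Article"
-- ===== Notes on version B (the rewrite author's own statement) =====
-- stated objective: faster
-- what changed: Replaces the scan over PRIORITY_PTYPES with repeated 'in ptypes' membership tests by a precomputed name->rank dict and a single pass over ptypes that tracks the minimum-rank priority match and the first fallback.
import Mathlib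
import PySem

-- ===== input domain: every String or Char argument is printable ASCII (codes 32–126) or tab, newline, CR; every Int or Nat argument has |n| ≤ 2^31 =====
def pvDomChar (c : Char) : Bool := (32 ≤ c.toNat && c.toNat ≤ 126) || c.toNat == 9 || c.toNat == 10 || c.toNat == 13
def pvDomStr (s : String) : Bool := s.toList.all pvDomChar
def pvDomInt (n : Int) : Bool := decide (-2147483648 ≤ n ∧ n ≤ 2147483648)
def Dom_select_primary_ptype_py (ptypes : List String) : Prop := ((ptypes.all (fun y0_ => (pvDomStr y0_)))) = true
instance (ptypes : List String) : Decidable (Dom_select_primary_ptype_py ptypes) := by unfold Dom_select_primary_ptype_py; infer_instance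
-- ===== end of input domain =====

-- B replaces A's scan of PRIORITY_PTYPES with membership tests by a rank dict and one
-- pass over ptypes keeping the minimum-rank match and the first fallback (alternative
-- decomposition; same exact behaviour).

-- ===== PORT A =====
def PRIORITY_PTYPES : List String :=
  ["Practice Guideline", "Guideline", "Meta-Analysis", "Systematic Review",
   "Randomized Controlled Trial", "Clinical Trial, Phase III", "Clinical Trial, Phase II",
   "Clinical Trial", "Multicenter Study", "Observational Study", "Review"]

-- first loop of A: first priority that is a member of ptypes
def aFindPriority (prios ptypes : List String) : Option String :=
  match prios with
  | [] => none
  | p :: rest => if ptypes.contains p then some p else aFindPriority rest ptypes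

-- second loop of A: first non-empty entry other than "Journal Article"
def aFindFallback (ptypes : List String) : Option String :=
  match ptypes with
  | [] => none
  | pt :: rest =>
      if pt ≠ "" ∧ pt ≠ "Journal Article" then some pt else aFindFallback rest

def select_primary_ptype_py (ptypes : List String) : String :=
  match aFindPriority PRIORITY_PTYPES ptypes with
  | some p => p
  | none =>
    match aFindFallback ptypes with
    | some pt => pt
    | none => "Journal Article"

-- ===== PORT B =====
-- _RANK = {name: i for i, name in enumerate(PRIORITY_PTYPES)}
def RANK : PySem.Dict String Int :=
  PySem.Dict.ofList ((PySem.List.enumerate PRIORITY_PTYPES 0).map (fun p => (p.2, p.1)))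

-- loop body of B: update (best_rank, best_name) and fallback for one element
def bStep (st : Option (Int × String) × Option String) (pt : String) :
    Option (Int × String) × Option String :=
  let best :=
    match RANK.get? pt with
    | some r =>
      match st.1 with
      | none => some (r, pt)
      | some (br, bn) => if r < br then some (r, pt) else some (br, bn)
    | none => st.1
  let fb := if st.2 = none ∧ pt ≠ "" ∧ pt ≠ "Journal Article" then some pt else st.2
  (best, fb)

def select_primary_ptype_py_alt (ptypes : List String) : String :=
  match ptypes.foldl bStep (none, none) with
  | (some (_, name), _) => name
  | (none, some fb) => fb
  | (none, none) => "Journal Article"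

-- ===== PRECONDITION & SPEC =====
def Spec_select_primary_ptype_py (ptypes : List String) (out : String) : Prop := out = select_primary_ptype_py_alt ptypes
instance (ptypes : List String) (out : String) : Decidable (Spec_select_primary_ptype_py ptypes out) := by unfold Spec_select_primary_ptype_py; infer_instance

-- ===== CLAIM (what is proved, stated in full; the proofs are below) =====
def Claim_equal_select_primary_ptype_py : Prop := ∀ (ptypes : List String), Dom_select_primary_ptype_py ptypes → Spec_select_primary_ptype_py ptypes (select_primary_ptype_py ptypes)

-- ===== LEMMAS AND PROOFS =====

-- the best-component and fallback-component of bStep, separated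
def bestUpd (b : Option (Int × String)) (pt : String) : Option (Int × String) :=
  match RANK.get? pt with
  | some r =>
    match b with
    | none => some (r, pt)
    | some (br, bn) => if r < br then some (r, pt) else some (br, bn)
  | none => b

def fbUpd (f : Option String) (pt : String) : Option String :=
  if f = none ∧ pt ≠ "" ∧ pt ≠ "Journal Article" then some pt else f

theorem foldl_bStep_split (xs : List String) (b : Option (Int × String)) (f : Option String) :
    xs.foldl bStep (b, f) = (xs.foldl bestUpd b, xs.foldl fbUpd f) := by
  induction xs generalizing b f with
  | nil => rfl
  | cons x t ih => simpa [List.foldl, bStep, bestUpd, fbUpd] using ih _ _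

theorem fb_some (xs : List String) (s : String) : xs.foldl fbUpd (some s) = some s := by
  induction xs with
  | nil => rfl
  | cons x t ih => simpa [List.foldl, fbUpd] using ih

theorem fb_none (xs : List String) : xs.foldl fbUpd none = aFindFallback xs := by
  induction xs with
  | nil => rfl
  | cons x t ih =>
    by_cases h : x ≠ "" ∧ x ≠ "Journal Article"
    · simp [List.foldl, fbUpd, aFindFallback, h, fb_some]
    · simp [List.foldl, fbUpd, aFindFallback, h, ih]

theorem find_none (prios ptypes : List String) :
    aFindPriority prios ptypes = none ↔ ∀ p ∈ prios, p ∉ ptypes := by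
  induction prios with
  | nil => simp [aFindPriority]
  | cons p rest ih =>
    by_cases hp : p ∈ ptypes
    · simp [aFindPriority, hp]
    · simp [aFindPriority, hp, ih]

theorem find_some (prios ptypes : List String) (p : String)
    (h : aFindPriority prios ptypes = some p) :
    p ∈ ptypes ∧ ∃ l1 l2, prios = l1 ++ p :: l2 ∧ ∀ q ∈ l1, q ∉ ptypes := by
  induction prios with
  | nil => simp [aFindPriority] at h
  | cons q rest ih =>
    by_cases hq : q ∈ ptypes
    · simp [aFindPriority, hq] at h
      subst h
      exact ⟨hq, [], rest, by simp⟩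
    · simp [aFindPriority, hq] at h
      obtain ⟨hm, l1, l2, heq, hall⟩ := ih h
      refine ⟨hm, q :: l1, l2, by simp [heq], ?_⟩
      intro r hr
      rcases List.mem_cons.mp hr with rfl | hr
      · exact hq
      · exact hall r hr

-- RANK evaluated to a literal dict
theorem rank_items : RANK = PySem.Dict.mk [("Practice Guideline",0),("Guideline",1),("Meta-Analysis",2),("Systematic Review",3),("Randomized Controlled Trial",4),("Clinical Trial, Phase III",5),("Clinical Trial, Phase II",6),("Clinical Trial",7),("Multicenter Study",8),("Observational Study",9),("Review",10)] := by decide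

-- every binding of RANK is (PRIORITY_PTYPES[k], k)
set_option maxHeartbeats 1600000 in
theorem rank_getElem (s : String) (r : Int) (h : RANK.get? s = some r) :
    ∃ k : Nat, r = (k : Int) ∧ PRIORITY_PTYPES[k]? = some s := by
  rw [rank_items] at h
  simp only [PySem.Dict.get?_mk_cons] at h
  split_ifs at h with h0 h1 h2 h3 h4 h5 h6 h7 h8 h9 h10
  · cases eq_of_beq h0; cases h; exact ⟨0, by decide, by decide⟩
  · cases eq_of_beq h1; cases h; exact ⟨1, by decide, by decide⟩
  · cases eq_of_beq h2; cases h; exact ⟨2, by decide, by decide⟩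
  · cases eq_of_beq h3; cases h; exact ⟨3, by decide, by decide⟩
  · cases eq_of_beq h4; cases h; exact ⟨4, by decide, by decide⟩
  · cases eq_of_beq h5; cases h; exact ⟨5, by decide, by decide⟩
  · cases eq_of_beq h6; cases h; exact ⟨6, by decide, by decide⟩
  · cases eq_of_beq h7; cases h; exact ⟨7, by decide, by decide⟩
  · cases eq_of_beq h8; cases h; exact ⟨8, by decide, by decide⟩
  · cases eq_of_beq h9; cases h; exact ⟨9, by decide, by decide⟩
  · cases eq_of_beq h10; cases h; exact ⟨10, by decide, by decide⟩
  · exact absurd h (by simp [PySem.Dict.get?])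

theorem rank_of_mem (s : String) (h : s ∈ PRIORITY_PTYPES) : ∃ r, RANK.get? s = some r := by
  fin_cases h
  · exact ⟨0, by decide⟩
  · exact ⟨1, by decide⟩
  · exact ⟨2, by decide⟩
  · exact ⟨3, by decide⟩
  · exact ⟨4, by decide⟩
  · exact ⟨5, by decide⟩
  · exact ⟨6, by decide⟩
  · exact ⟨7, by decide⟩
  · exact ⟨8, by decide⟩
  · exact ⟨9, by decide⟩
  · exact ⟨10, by decide⟩

-- the three-part invariant of the best-fold: soundness (a result was seen in xs and
-- carries its own rank), completeness with minimality, and monotonicity in the seed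
theorem best_fold_inv (xs : List String) (b : Option (Int × String)) :
    (∀ r s, xs.foldl bestUpd b = some (r, s) →
        b = some (r, s) ∨ (s ∈ xs ∧ RANK.get? s = some r)) ∧
    (∀ x ∈ xs, ∀ rx : Int, RANK.get? x = some rx →
        ∃ r s, xs.foldl bestUpd b = some (r, s) ∧ r ≤ rx) ∧
    (∀ rb sb, b = some (rb, sb) → ∃ r s, xs.foldl bestUpd b = some (r, s) ∧ r ≤ rb) := by
  induction xs generalizing b with
  | nil =>
    refine ⟨fun r s h => Or.inl h, by simp, ?_⟩
    intro rb sb hb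
    exact ⟨rb, sb, by simpa using hb, le_refl _⟩
  | cons x t ih =>
    obtain ⟨ih1, ih2, ih3⟩ := ih (bestUpd b x)
    have hstep : ∀ (rb : Int) (sb : String), b = some (rb, sb) →
        ∃ r0 s0, bestUpd b x = some (r0, s0) ∧ r0 ≤ rb := by
      intro rb sb hb
      subst hb
      cases hrx : RANK.get? x with
      | none => exact ⟨rb, sb, by simp [bestUpd, hrx], le_refl _⟩
      | some rx =>
        by_cases hlt : rx < rb
        · exact ⟨rx, x, by simp [bestUpd, hrx, hlt], le_of_lt hlt⟩
        · exact ⟨rb, sb, by simp [bestUpd, hrx, hlt], le_refl _⟩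
    refine ⟨?_, ?_, ?_⟩
    · intro r s h
      rcases ih1 r s h with hb | ⟨hm, hr⟩
      · cases hrx : RANK.get? x with
        | none => simp [bestUpd, hrx] at hb; exact Or.inl hb
        | some rx =>
          cases hbb : b with
          | none =>
            simp [bestUpd, hrx, hbb] at hb
            exact Or.inr ⟨by simp [hb.2.symm], by rw [← hb.2, ← hb.1]; exact hrx⟩
          | some p =>
            obtain ⟨br, bn⟩ := p
            by_cases hlt : rx < br
            · simp [bestUpd, hrx, hbb, hlt] at hb
              exact Or.inr ⟨by simp [hb.2.symm], by rw [← hb.2, ← hb.1]; exact hrx⟩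
            · simp [bestUpd, hrx, hbb, hlt] at hb
              exact Or.inl (by rw [hb.1, hb.2])
      · exact Or.inr ⟨List.mem_cons_of_mem _ hm, hr⟩
    · intro x' hx' rx hrx
      rcases List.mem_cons.mp hx' with rfl | hx'
      · have hup : ∃ r0 s0, bestUpd b x' = some (r0, s0) ∧ r0 ≤ rx := by
          cases hbb : b with
          | none => exact ⟨rx, x', by simp [bestUpd, hrx], le_refl _⟩
          | some p =>
            obtain ⟨br, bn⟩ := p
            by_cases hlt : rx < br
            · exact ⟨rx, x', by simp [bestUpd, hrx, hlt], le_refl _⟩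
            · exact ⟨br, bn, by simp [bestUpd, hrx, hlt], le_of_not_gt hlt⟩
        obtain ⟨r0, s0, he, hle⟩ := hup
        obtain ⟨r1, s1, hres, hle1⟩ := ih3 r0 s0 he
        exact ⟨r1, s1, hres, le_trans hle1 hle⟩
      · exact ih2 x' hx' rx hrx
    · intro rb sb hb
      obtain ⟨r0, s0, he, hle⟩ := hstep rb sb hb
      obtain ⟨r1, s1, hres, hle1⟩ := ih3 r0 s0 he
      exact ⟨r1, s1, hres, le_trans hle1 hle⟩

theorem priority_nodup : PRIORITY_PTYPES.Nodup := by decide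

theorem select_primary_eq (ptypes : List String) :
    select_primary_ptype_py ptypes = select_primary_ptype_py_alt ptypes := by
  unfold select_primary_ptype_py select_primary_ptype_py_alt
  rw [foldl_bStep_split]
  cases hA : aFindPriority PRIORITY_PTYPES ptypes with
  | none =>
    have hall := (find_none _ _).mp hA
    have hbest : ptypes.foldl bestUpd none = none := by
      cases hres : ptypes.foldl bestUpd none with
      | none => rfl
      | some p =>
        obtain ⟨r, s⟩ := p
        rcases (best_fold_inv ptypes none).1 r s hres with h | ⟨hm, hr⟩
        · exact absurd h (by simp)
        · obtain ⟨k, _, hk⟩ := rank_getElem s r hr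
          exact absurd hm (hall s (List.mem_of_getElem? hk))
    rw [hbest, fb_none]
    cases aFindFallback ptypes <;> rfl
  | some p =>
    obtain ⟨hmem, l1, l2, heq, hl1⟩ := find_some _ _ _ hA
    have hpP : p ∈ PRIORITY_PTYPES := by
      rw [heq]; exact List.mem_append_right _ (List.mem_cons_self)
    obtain ⟨rp, hrp⟩ := rank_of_mem p hpP
    obtain ⟨kp, hkp, hgp⟩ := rank_getElem p rp hrp
    have h2 : PRIORITY_PTYPES[l1.length]? = some p := by
      rw [heq]; simp
    have hkp_len : kp = l1.length := by
      have hlt : kp < PRIORITY_PTYPES.length := (List.getElem?_eq_some_iff.mp hgp).1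
      exact List.getElem?_inj hlt priority_nodup (hgp.trans h2.symm)
    obtain ⟨r, s, hres, hle⟩ := (best_fold_inv ptypes none).2.1 p hmem rp hrp
    rcases (best_fold_inv ptypes none).1 r s hres with h | ⟨hm, hr⟩
    · simp at h
    · obtain ⟨k, hk, hgk⟩ := rank_getElem s r hr
      have hkkp : k ≤ kp := by rw [hk, hkp] at hle; exact_mod_cast hle
      have hkeq : k = kp := by
        by_contra hne
        have hklt : k < l1.length := by omega
        have hpre : l1[k]? = some s := by
          rw [heq] at hgk
          rwa [List.getElem?_append_left hklt] at hgk
        exact hl1 s (List.mem_of_getElem? hpre) hm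
      have hsp : s = p := by
        rw [hkeq] at hgk
        rw [hgk] at hgp
        exact Option.some_inj.mp hgp
      rw [hres, hsp]

-- ===== VERDICT (by name: the statement is the Claim_ definition above) =====
theorem select_primary_ptype_py_spec : Claim_equal_select_primary_ptype_py := by
  intro ptypes _
  exact select_primary_eq ptypes
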